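-- pv_equiv track=rewrite | github.com/Anuragsangem/Naive-Bayes-from-scratch-in-python | part1/raichu.py | if_game_end
-- ===== SOURCE A (Python) =====
-- def if_game_end(board_succ):
--     black_counter = 0
--     white_counter = 0
--
--     for i in board_succ:
--         for j in range(len(i)):
--             if i[j] == 'b' or i[j] == 'B' or i[j] == '$':
--                 black_counter += 1
--
--             elif i[j] == 'w' or i[j] == 'W' or i[j] == '@':
--                 white_counter += 1
--
--     victor = 'x'
--     # Since, we don't yet know the victor here we gave it 'x' :) as unknown.
--     if black_counter == 0:
--         victor = 'w'
--
--     elif white_counter == 0: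
--         victor = 'b'
--
--     else:
--         return None
--
--     return victor
-- ===== SOURCE B (Python) =====
-- def if_game_end(board_succ):
--     def present(pieces):
--         # existence query with early exit: substring search per row, short-circuit
--         return any(any(p in row for p in pieces) for row in board_succ)
--
--     if not present('bB$'):
--         return 'w'
--     if not present('wW@'):
--         return 'b'
--     return None
-- ===== Notes on version B (the rewrite author's own statement) =====
-- stated objective: simpler
-- what changed: Replaces A's exhaustive one-pass per-cell counting (counts only ever compared to zero) with two staged short-circuiting existence queries using substring membership 'p in row' per piece character, stopping at the first hit.
import Mathlib
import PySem

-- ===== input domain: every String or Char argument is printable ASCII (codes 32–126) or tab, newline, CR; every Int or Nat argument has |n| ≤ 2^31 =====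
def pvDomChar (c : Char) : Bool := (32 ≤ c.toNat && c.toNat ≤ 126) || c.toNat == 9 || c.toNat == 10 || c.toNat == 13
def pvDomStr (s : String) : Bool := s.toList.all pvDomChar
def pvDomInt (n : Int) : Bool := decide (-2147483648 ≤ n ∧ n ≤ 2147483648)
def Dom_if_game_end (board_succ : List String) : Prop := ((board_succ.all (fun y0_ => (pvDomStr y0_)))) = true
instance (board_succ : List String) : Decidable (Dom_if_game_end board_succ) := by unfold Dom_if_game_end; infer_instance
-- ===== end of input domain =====

-- B replaces A's exhaustive per-cell counting (the counts are only ever compared to zero)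
-- with two staged short-circuiting existence queries ('p in row' per piece character); simpler.


-- ===== PORT A =====
-- for i in board_succ: for j in range(len(i)): count black/white cells, then test counts against 0
def if_game_end (board_succ : List String) : Option String :=
  let counters : Int × Int :=
    board_succ.foldl (fun acc i =>
      i.toList.foldl (fun (acc : Int × Int) c =>
        if c = 'b' ∨ c = 'B' ∨ c = '$' then (acc.1 + 1, acc.2)
        else if c = 'w' ∨ c = 'W' ∨ c = '@' then (acc.1, acc.2 + 1)
        else acc) acc) (0, 0)
  if counters.1 = 0 then some "w"
  else if counters.2 = 0 then some "b"
  else none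

-- ===== PORT B =====
-- any(any(p in row for p in pieces) for row in board_succ); 'p in row' for a 1-char p is char membership
def pvPresent (board : List String) (pieces : List Char) : Bool :=
  board.any (fun row => pieces.any (fun p => row.toList.contains p))

def if_game_end_alt (board_succ : List String) : Option String :=
  if !(pvPresent board_succ "bB$".toList) then some "w"
  else if !(pvPresent board_succ "wW@".toList) then some "b"
  else none

-- ===== PRECONDITION & SPEC =====
def Spec_if_game_end (board_succ : List String) (out : Option String) : Prop := out = if_game_end_alt board_succ
instance (board_succ : List String) (out : Option String) : Decidable (Spec_if_game_end board_succ out) := by unfold Spec_if_game_end; infer_instance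

-- ===== CLAIM (what is proved, stated in full; the proofs are below) =====
def Claim_equal_if_game_end : Prop := ∀ (board_succ : List String), Dom_if_game_end board_succ → Spec_if_game_end board_succ (if_game_end board_succ)

-- ===== LEMMAS AND PROOFS =====

def pvIsBlack (c : Char) : Bool := c = 'b' || c = 'B' || c = '$'
def pvIsWhite (c : Char) : Bool := c = 'w' || c = 'W' || c = '@'

-- A's inner fold over one row, characterised by countP
lemma pvRowFold (cs : List Char) (acc : Int × Int) :
    cs.foldl (fun (acc : Int × Int) c =>
        if c = 'b' ∨ c = 'B' ∨ c = '$' then (acc.1 + 1, acc.2)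
        else if c = 'w' ∨ c = 'W' ∨ c = '@' then (acc.1, acc.2 + 1)
        else acc) acc
    = (acc.1 + cs.countP pvIsBlack, acc.2 + cs.countP pvIsWhite) := by
  induction cs generalizing acc with
  | nil => simp
  | cons c cs ih =>
    by_cases hb : c = 'b' ∨ c = 'B' ∨ c = '$'
    · have hbB : pvIsBlack c = true := by rcases hb with rfl | rfl | rfl <;> rfl
      have hwB : pvIsWhite c = false := by rcases hb with rfl | rfl | rfl <;> rfl
      simp [hb, hbB, hwB, ih, Prod.ext_iff]
      omega
    · by_cases hw : c = 'w' ∨ c = 'W' ∨ c = '@'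
      · have hwB : pvIsWhite c = true := by rcases hw with rfl | rfl | rfl <;> rfl
        have hbB : pvIsBlack c = false := by rcases hw with rfl | rfl | rfl <;> rfl
        simp [hb, hw, hbB, hwB, ih, Prod.ext_iff]
        omega
      · have hbB : pvIsBlack c = false := by
          simp [pvIsBlack]; tauto
        have hwB : pvIsWhite c = false := by
          simp [pvIsWhite]; tauto
        simp [hb, hw, hbB, hwB, ih]

-- A's full counter pair
lemma pvCounters (board : List String) (acc : Int × Int) :
    board.foldl (fun acc i =>
        i.toList.foldl (fun (acc : Int × Int) c =>
          if c = 'b' ∨ c = 'B' ∨ c = '$' then (acc.1 + 1, acc.2)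
          else if c = 'w' ∨ c = 'W' ∨ c = '@' then (acc.1, acc.2 + 1)
          else acc) acc) acc
    = (acc.1 + ((board.map (fun i => i.toList.countP pvIsBlack)).sum : Nat),
       acc.2 + ((board.map (fun i => i.toList.countP pvIsWhite)).sum : Nat)) := by
  induction board generalizing acc with
  | nil => simp
  | cons i board ih =>
    rw [List.foldl_cons, pvRowFold, ih, List.map_cons, List.map_cons, List.sum_cons, List.sum_cons]
    apply Prod.ext <;> simp <;> ring

-- the count sum is zero iff the existence query fails
lemma pvZeroIffNotPresent (board : List String) (pieces : List Char) (q : Char → Bool)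
    (hq : ∀ c, q c = true ↔ c ∈ pieces) :
    ((board.map (fun i => i.toList.countP q)).sum = 0)
      ↔ pvPresent board pieces = false := by
  unfold pvPresent
  rw [List.sum_eq_zero_iff_forall_eq_nat]
  constructor
  · intro h
    rw [List.any_eq_false]
    intro row hrow
    rw [Bool.not_eq_true, List.any_eq_false]
    intro p hp hmem
    simp only [List.contains_eq_mem, decide_eq_true_eq] at hmem
    have h0 : row.toList.countP q = 0 := h _ (List.mem_map.mpr ⟨row, hrow, rfl⟩)
    exact absurd ((hq p).mpr hp) (by simpa using List.countP_eq_zero.mp h0 p hmem)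
  · intro h n hn
    obtain ⟨row, hrow, rfl⟩ := List.mem_map.mp hn
    refine List.countP_eq_zero.mpr fun c hc hqc => ?_
    have h2 := List.any_eq_false.mp h row hrow
    rw [Bool.not_eq_true, List.any_eq_false] at h2
    have h3 := h2 c ((hq c).mp hqc)
    simp only [List.contains_eq_mem, decide_eq_true_eq] at h3
    exact h3 hc

-- ===== VERDICT (by name: the statement is the Claim_ definition above) =====
theorem if_game_end_spec : Claim_equal_if_game_end := by
  intro board _
  show if_game_end board = if_game_end_alt board
  unfold if_game_end if_game_end_alt
  rw [pvCounters]
  have hzb := pvZeroIffNotPresent board "bB$".toList pvIsBlack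
    (fun c => by simp [pvIsBlack, show "bB$".toList = ['b','B','$'] from rfl]; tauto)
  have hzw := pvZeroIffNotPresent board "wW@".toList pvIsWhite
    (fun c => by simp [pvIsWhite, show "wW@".toList = ['w','W','@'] from rfl]; tauto)
  simp only [zero_add, Nat.cast_eq_zero]
  by_cases h1 : pvPresent board "bB$".toList = false
  · rw [if_pos (hzb.mpr h1), h1]; rfl
  · have h1' : pvPresent board "bB$".toList = true := by simpa using h1
    rw [if_neg (fun h => h1 (hzb.mp h)), h1']
    by_cases h2 : pvPresent board "wW@".toList = false
    · rw [if_pos (hzw.mpr h2), h2]; rfl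
    · have h2' : pvPresent board "wW@".toList = true := by simpa using h2
      rw [if_neg (fun h => h2 (hzw.mp h)), h2']; rfl
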